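-- pv_equiv track=rewrite | github.com/wilys-json/pyrestus | sequences/compute/src/combinations.py | find_cluster_indices
-- ===== SOURCE A (Python) =====
-- def find_cluster_indices(sequence):
--     """
--     Find the K+1 indices of duplicated numerical values (k-th elements).
--
--     Arg:
--         sequence: Sorted 1D array or list of numerical values, e.g. timestamps
--     Return:
--         indices : A list of slicing indices that cluster identifical values into nested list.
--
--     Time Complexity: O(N)
--     """
--     indices = []
--     pivot_val = sequence[0]
--     for i, val in enumerate(sequence):
--         if val != pivot_val:
--             indices += [i]
--             pivot_val = val
--     indices += [len(sequence)]
--     return indices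
-- ===== SOURCE B (Python) =====
-- def find_cluster_indices(sequence):
--     # Stage 1: run-length encode the sequence into lengths of maximal
--     # runs of consecutive equal values (inner scan finds each run's end).
--     lengths = []
--     n = len(sequence)
--     i = 0
--     while i < n:
--         j = i + 1
--         while j < n and sequence[j] == sequence[i]:
--             j += 1
--         lengths.append(j - i)
--         i = j
--     # Stage 2: the cluster boundaries are the prefix sums of the run lengths.
--     boundaries = []
--     total = 0
--     for length in lengths:
--         total += length
--         boundaries.append(total)
--     return boundaries
-- ===== Notes on version B (the rewrite author's own statement) =====
-- stated objective: alternative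
-- what changed: Instead of one flat pass tracking a mutable pivot and recording change indices, B first run-length encodes the sequence with a nested scan that jumps from run end to run end, then turns the run lengths into boundaries by a separate prefix-sum pass.
import Mathlib
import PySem

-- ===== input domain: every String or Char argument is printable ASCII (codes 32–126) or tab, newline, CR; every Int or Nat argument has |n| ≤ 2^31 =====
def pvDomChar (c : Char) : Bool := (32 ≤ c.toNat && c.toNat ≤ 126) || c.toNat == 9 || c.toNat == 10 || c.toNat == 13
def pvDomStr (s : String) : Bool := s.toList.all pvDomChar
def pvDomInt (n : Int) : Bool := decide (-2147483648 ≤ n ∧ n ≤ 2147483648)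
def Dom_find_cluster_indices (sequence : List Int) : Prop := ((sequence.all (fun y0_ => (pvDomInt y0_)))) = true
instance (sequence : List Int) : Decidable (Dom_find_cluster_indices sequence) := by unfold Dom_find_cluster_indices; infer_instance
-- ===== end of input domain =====

-- B replaces A's flat pivot-tracking pass with two stages: run-length encoding
-- by a nested run-end scan, then a prefix-sum pass over the run lengths.

-- ===== PORT A =====
def find_cluster_indices (sequence : List Int) : List Int :=
  match PySem.List.pyGet? sequence 0 with
  | none => []   -- sequence[0] raises IndexError on the empty list; excluded by Pre_
  | some pivot0 =>
    let st := (PySem.List.enumerate sequence 0).foldl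
      (fun (st : List Int × Int) iv =>
        if iv.2 ≠ st.2 then (st.1 ++ [iv.1], iv.2) else st)
      (([] : List Int), pivot0)
    st.1 ++ [(sequence.length : Int)]

-- ===== PORT B =====
-- inner while: advance j past elements equal to sequence[i] (= x).
-- fuel bounds the number of iterations (the loop runs at most s.length times);
-- it only makes the recursion total and never changes the computed value.
def fciRunEnd (s : List Int) (x : Int) : Nat → Nat → Nat
  | j, 0 => j
  | j, fuel + 1 =>
    if j < s.length ∧ s[j]? = some x then fciRunEnd s x (j + 1) fuel else j

-- outer while: collect run lengths (j - i), jumping i to each run's end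
def fciRuns (s : List Int) : Nat → Nat → List Int
  | _, 0 => []
  | i, fuel + 1 =>
    if h : i < s.length then
      let j := fciRunEnd s s[i] (i + 1) s.length
      ((j : Int) - (i : Int)) :: fciRuns s j fuel
    else []

def find_cluster_indices_alt (sequence : List Int) : List Int :=
  let lengths := fciRuns sequence 0 sequence.length
  (lengths.foldl (fun (st : List Int × Int) L => (st.1 ++ [st.2 + L], st.2 + L))
    (([] : List Int), (0 : Int))).1

-- ===== PRECONDITION & SPEC =====
-- Pre_ excludes exactly the empty list, on which A raises IndexError (sequence[0]).
def Pre_find_cluster_indices (sequence : List Int) : Prop := sequence ≠ []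
instance (sequence : List Int) : Decidable (Pre_find_cluster_indices sequence) := by unfold Pre_find_cluster_indices; infer_instance
def pvWitness_find_cluster_indices : List Int := [1, 1, 2, 3, 3]

def Spec_find_cluster_indices (sequence : List Int) (out : List Int) : Prop := out = find_cluster_indices_alt sequence
instance (sequence : List Int) (out : List Int) : Decidable (Spec_find_cluster_indices sequence out) := by unfold Spec_find_cluster_indices; infer_instance

-- ===== CLAIM =====
def Claim_equal_find_cluster_indices : Prop := ∀ (sequence : List Int), Dom_find_cluster_indices sequence → Pre_find_cluster_indices sequence → Spec_find_cluster_indices sequence (find_cluster_indices sequence)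

-- ===== LEMMAS AND PROOFS =====

-- Reference function both sides are reduced to: walking t with pivot p and
-- next index k, emitting each change index and finally k (= total length).
def fciGo : List Int → Int → Int → List Int
  | [], _, k => [k]
  | v :: r, p, k => if v ≠ p then k :: fciGo r v (k + 1) else fciGo r p (k + 1)

-- A's fold equals fciGo.
lemma fciA_eq (t : List Int) (p k : Int) (acc : List Int) :
    ((PySem.List.enumerate t k).foldl
        (fun (st : List Int × Int) iv =>
          if iv.2 ≠ st.2 then (st.1 ++ [iv.1], iv.2) else st)
        (acc, p)).1 ++ [k + t.length] = acc ++ fciGo t p k := by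
  induction t generalizing p k acc with
  | nil => simp [fciGo, PySem.List.enumerate]
  | cons v r ih =>
    simp only [PySem.List.enumerate_cons, List.foldl_cons, fciGo, List.length_cons]
    rw [show ((r.length + 1 : Nat) : Int) = (r.length : Int) + 1 by push_cast; ring,
        show k + ((r.length : Int) + 1) = (k + 1) + r.length by ring]
    by_cases hv : v ≠ p
    · rw [if_pos hv]
      rw [if_pos hv]
      have := ih v (k + 1) (acc ++ [k])
      simpa [List.append_assoc] using this
    · rw [if_neg hv]
      rw [if_neg hv]
      exact ih p (k + 1) acc

-- Structural run-length encoding (proof-side counterpart of fciRuns).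
def fciRL : List Int → List Int
  | [] => []
  | x :: t =>
    let tw := (t.takeWhile (· == x)).length
    (1 + (tw : Int)) :: fciRL (t.drop tw)
termination_by l => l.length
decreasing_by simp [List.length_drop]

lemma fciRunEnd_eq (s : List Int) (x : Int) (fuel j : Nat) (hf : s.length - j ≤ fuel) :
    fciRunEnd s x j fuel = j + ((s.drop j).takeWhile (· == x)).length := by
  induction fuel generalizing j with
  | zero =>
    have hd : s.drop j = [] := List.drop_eq_nil_of_le (by omega)
    simp [fciRunEnd, hd]
  | succ fuel ih =>
    simp only [fciRunEnd]
    split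
    case isTrue h =>
      obtain ⟨hlt, hget⟩ := h
      have hx : s[j] = x := by simpa [List.getElem?_eq_getElem hlt] using hget
      have hd : s.drop j = x :: s.drop (j + 1) := by
        rw [List.drop_eq_getElem_cons hlt, hx]
      rw [ih (j + 1) (by omega), hd]
      simp
      omega
    case isFalse h =>
      rcases Nat.lt_or_ge j s.length with hlt | hge
      · have hget : ¬ s[j]? = some x := fun hc => h ⟨hlt, hc⟩
        have hx : ¬ s[j] = x := by simpa [List.getElem?_eq_getElem hlt] using hget
        rw [List.drop_eq_getElem_cons hlt]
        simp [hx]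
      · rw [List.drop_eq_nil_of_le hge]; simp

lemma fciRuns_eq (s : List Int) (fuel i : Nat) (hf : s.length - i ≤ fuel) :
    fciRuns s i fuel = fciRL (s.drop i) := by
  induction fuel generalizing i with
  | zero =>
    rw [List.drop_eq_nil_of_le (by omega), fciRL.eq_def]
    simp [fciRuns]
  | succ fuel ih =>
    simp only [fciRuns]
    split
    case isTrue hlt =>
      have hd : s.drop i = s[i] :: s.drop (i + 1) := List.drop_eq_getElem_cons hlt
      have hre : fciRunEnd s s[i] (i + 1) s.length
          = (i + 1) + ((s.drop (i + 1)).takeWhile (· == s[i])).length :=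
        fciRunEnd_eq s s[i] s.length (i + 1) (by omega)
      have htw : ((s.drop (i + 1)).takeWhile (· == s[i])).length ≤ (s.drop (i + 1)).length :=
        (List.takeWhile_sublist _).length_le
      have hlen : (s.drop (i + 1)).length = s.length - (i + 1) := by simp
      rw [hd, fciRL.eq_def]
      simp only
      congr 1
      · rw [hre]; push_cast; ring
      · rw [hre, ih _ (by omega), ← List.drop_drop]
    case isFalse h =>
      rw [List.drop_eq_nil_of_le (by omega), fciRL.eq_def]

-- Prefix-sum fold in terms of a cumulative helper.
def fciCum : Int → List Int → List Int
  | _, [] => []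
  | tot, l :: ls => (tot + l) :: fciCum (tot + l) ls

lemma fciFold_eq (L : List Int) (acc : List Int) (tot : Int) :
    (L.foldl (fun (st : List Int × Int) l => (st.1 ++ [st.2 + l], st.2 + l)) (acc, tot)).1
      = acc ++ fciCum tot L := by
  induction L generalizing acc tot with
  | nil => simp [fciCum]
  | cons l ls ih => simp [fciCum, ih, List.append_assoc]

-- head of the remainder after dropping the equal-to-x prefix differs from x
lemma fci_drop_head_ne (l : List Int) (x v : Int) (r : List Int)
    (h : l.drop ((l.takeWhile (· == x)).length) = v :: r) : v ≠ x := by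
  induction l generalizing r with
  | nil => simp at h
  | cons a t ih =>
    by_cases ha : a = x
    · subst ha
      rw [List.takeWhile_cons, if_pos (by simp)] at h
      simp only [List.length_cons, List.drop_succ_cons] at h
      exact ih r h
    · rw [List.takeWhile_cons, if_neg (by simpa using ha)] at h
      simp at h
      rw [← h.1]; exact ha

-- fciGo skips a prefix of elements equal to the pivot.
lemma fciGo_skip (t : List Int) (x : Int) (k : Int) :
    fciGo t x k = fciGo (t.drop ((t.takeWhile (· == x)).length)) x
      (k + ((t.takeWhile (· == x)).length : Int)) := by
  induction t generalizing k with
  | nil => simp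
  | cons v r ih =>
    by_cases hv : v = x
    · subst hv
      rw [fciGo, if_neg (by simp), List.takeWhile_cons, if_pos (by simp)]
      simp only [List.length_cons, List.drop_succ_cons]
      rw [ih (k + 1)]
      congr 1
      push_cast; ring
    · rw [List.takeWhile_cons, if_neg (by simpa using hv)]
      simp

-- cumulative run lengths = fciGo
lemma fciCum_eq_go (n : Nat) (t : List Int) (ht : t.length ≤ n) (x k : Int) :
    fciCum k (fciRL (x :: t)) = fciGo t x (k + 1) := by
  induction n generalizing t x k with
  | zero =>
    have : t = [] := List.length_eq_zero_iff.mp (by omega)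
    subst this
    rw [fciRL.eq_def]
    simp [fciRL.eq_def, fciCum, fciGo]
  | succ n ih =>
    rw [fciRL.eq_def, fciGo_skip t x (k + 1)]
    simp only
    set tw := (t.takeWhile (· == x)).length with htw
    simp only [fciCum]
    cases hdd : t.drop tw with
    | nil =>
      rw [fciRL.eq_def]
      simp only [fciCum, fciGo]
      congr 1; ring
    | cons v r =>
      have hv : v ≠ x := fci_drop_head_ne t x v r (by rw [← htw, hdd])
      rw [show fciGo (v :: r) x (k + 1 + (tw : Int))
            = (k + 1 + (tw : Int)) :: fciGo r v (k + 1 + (tw : Int) + 1) from by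
        simp only [fciGo, if_pos hv]]
      have hlen : r.length ≤ n := by
        have h1 := List.length_drop (l := t) (i := tw)
        rw [hdd] at h1
        have h2 : (t.takeWhile (· == x)).length ≤ t.length :=
          (List.takeWhile_sublist _).length_le
        simp at h1
        omega
      have hih := ih r hlen v (k + (1 + (tw : Int)))
      rw [show k + (1 + (tw : Int)) + 1 = k + 1 + tw + 1 by ring] at hih
      rw [hih]
      congr 1
      ring

-- ===== VERDICT =====
theorem find_cluster_indices_spec : Claim_equal_find_cluster_indices := by
  intro s _hdom hpre
  unfold Spec_find_cluster_indices
  obtain ⟨x, t, rfl⟩ := List.exists_cons_of_ne_nil hpre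
  unfold find_cluster_indices find_cluster_indices_alt
  rw [show PySem.List.pyGet? (x :: t) 0 = some x from by
    simp [PySem.List.pyGet?, PySem.List.pyIdx?]]
  simp only [PySem.List.enumerate_cons, List.foldl_cons]
  rw [if_neg (by simp : ¬ (x ≠ x))]
  have hA := fciA_eq t x 1 []
  rw [show (0 : Int) + 1 = 1 from rfl]
  have hlen : (((x :: t).length : Nat) : Int) = 1 + t.length := by
    simp; ring
  rw [hlen, hA, List.nil_append]
  rw [fciFold_eq, fciRuns_eq (x :: t) (x :: t).length 0 (by omega), List.drop_zero,
      List.nil_append]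
  rw [fciCum_eq_go t.length t le_rfl x 0, zero_add]
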